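-- pv_equiv track=rewrite | github.com/defremont/GitGet | src/utils/file_analyzer.py | _identify_project_type
-- ===== SOURCE A (Python) =====
-- from collections import Counter
--
-- def _identify_project_type(file_types: Counter) -> str:
--     """Identify project type based on file extensions"""
--     project_indicators = {
--         'web': ['html', 'css', 'js', 'jsx', 'ts', 'tsx', 'vue', 'angular'],
--         'mobile': ['swift', 'kt', 'java', 'dart', 'xaml'],
--         'backend': ['py', 'java', 'cs', 'go', 'rb', 'php', 'rs'],
--         'data': ['ipynb', 'r', 'sql', 'parquet', 'csv'],
--         'devops': ['yml', 'yaml', 'tf', 'dockerfile', 'sh']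
--     }
--
--     project_type = 'general'
--     max_score = 0
--
--     for ptype, extensions in project_indicators.items():
--         score = sum(file_types.get(ext, 0) for ext in extensions)
--         if score > max_score:
--             max_score = score
--             project_type = ptype
--
--     return project_type
-- ===== SOURCE B (Python) =====
-- def _identify_project_type(file_types) -> str:
--     """Identify project type based on file extensions"""
--     categories = ['web', 'mobile', 'backend', 'data', 'devops']
--     ext_index = {
--         'html': ['web'], 'css': ['web'], 'js': ['web'], 'jsx': ['web'],
--         'ts': ['web'], 'tsx': ['web'], 'vue': ['web'], 'angular': ['web'],
--         'swift': ['mobile'], 'kt': ['mobile'], 'java': ['mobile', 'backend'],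
--         'dart': ['mobile'], 'xaml': ['mobile'],
--         'py': ['backend'], 'cs': ['backend'], 'go': ['backend'],
--         'rb': ['backend'], 'php': ['backend'], 'rs': ['backend'],
--         'ipynb': ['data'], 'r': ['data'], 'sql': ['data'],
--         'parquet': ['data'], 'csv': ['data'],
--         'yml': ['devops'], 'yaml': ['devops'], 'tf': ['devops'],
--         'dockerfile': ['devops'], 'sh': ['devops'],
--     }
--     scores = dict.fromkeys(categories, 0)
--     for ext, count in file_types.items():
--         for cat in ext_index.get(ext, []):
--             scores[cat] += count
--     best, best_score = 'general', 0
--     for cat in categories: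
--         if scores[cat] > best_score:
--             best, best_score = cat, scores[cat]
--     return best
-- ===== Notes on version B (the rewrite author's own statement) =====
-- stated objective: alternative
-- what changed: Replaces A's five per-category generator sums of dict lookups by an inverted extension-to-categories index, a single accumulating pass over file_types.items(), and a final insertion-order scan of the five scores.
import Mathlib
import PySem

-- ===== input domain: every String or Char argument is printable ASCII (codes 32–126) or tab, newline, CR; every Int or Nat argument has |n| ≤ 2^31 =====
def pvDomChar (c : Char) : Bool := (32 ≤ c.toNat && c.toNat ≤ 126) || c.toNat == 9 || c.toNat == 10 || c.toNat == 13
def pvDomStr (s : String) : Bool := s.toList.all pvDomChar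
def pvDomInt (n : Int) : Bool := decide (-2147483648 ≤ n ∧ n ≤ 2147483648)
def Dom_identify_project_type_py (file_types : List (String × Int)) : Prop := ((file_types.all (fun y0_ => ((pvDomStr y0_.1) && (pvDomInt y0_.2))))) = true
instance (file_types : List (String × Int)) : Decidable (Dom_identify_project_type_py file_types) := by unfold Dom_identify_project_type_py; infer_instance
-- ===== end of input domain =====

-- B replaces A's per-category sums over repeated dict lookups by an inverted extension→categories
-- index and one accumulating pass over file_types (alternative decomposition, same result).


-- ===== PORT A =====
def pvIndicators : List (String × List String) :=
  [("web", ["html", "css", "js", "jsx", "ts", "tsx", "vue", "angular"]),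
   ("mobile", ["swift", "kt", "java", "dart", "xaml"]),
   ("backend", ["py", "java", "cs", "go", "rb", "php", "rs"]),
   ("data", ["ipynb", "r", "sql", "parquet", "csv"]),
   ("devops", ["yml", "yaml", "tf", "dockerfile", "sh"])]

def identify_project_type_py (file_types : List (String × Int)) : String :=
  let ftd : PySem.Dict String Int := PySem.Dict.mk file_types
  (pvIndicators.foldl
    (fun (st : String × Int) p =>
      let score := (p.2.map (fun ext => ftd.getD ext 0)).sum
      if st.2 < score then (p.1, score) else st)
    ("general", 0)).1

-- ===== PORT B =====
def pvCategories : List String := ["web", "mobile", "backend", "data", "devops"]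

def pvExtIndex : PySem.Dict String (List String) := PySem.Dict.mk
  [("html", ["web"]), ("css", ["web"]), ("js", ["web"]), ("jsx", ["web"]),
   ("ts", ["web"]), ("tsx", ["web"]), ("vue", ["web"]), ("angular", ["web"]),
   ("swift", ["mobile"]), ("kt", ["mobile"]), ("java", ["mobile", "backend"]),
   ("dart", ["mobile"]), ("xaml", ["mobile"]),
   ("py", ["backend"]), ("cs", ["backend"]), ("go", ["backend"]),
   ("rb", ["backend"]), ("php", ["backend"]), ("rs", ["backend"]),
   ("ipynb", ["data"]), ("r", ["data"]), ("sql", ["data"]),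
   ("parquet", ["data"]), ("csv", ["data"]),
   ("yml", ["devops"]), ("yaml", ["devops"]), ("tf", ["devops"]),
   ("dockerfile", ["devops"]), ("sh", ["devops"])]

def identify_project_type_py_alt (file_types : List (String × Int)) : String :=
  let scores0 : PySem.Dict String Int := PySem.Dict.mk (pvCategories.map (fun c => (c, 0)))
  let scores := file_types.foldl
    (fun sc p => (pvExtIndex.getD p.1 []).foldl (fun sc c => sc.modify c 0 (· + p.2)) sc)
    scores0
  (pvCategories.foldl
    (fun (st : String × Int) c =>
      let s := scores.getD c 0
      if st.2 < s then (c, s) else st)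
    ("general", 0)).1

-- ===== PRECONDITION & SPEC =====
-- Pre_ excludes association lists with duplicate keys, which can never arise from the Python
-- Counter/dict argument; on them A's first-match lookup vs B's per-item accumulation is accidental.
def Pre_identify_project_type_py (file_types : List (String × Int)) : Prop :=
  (file_types.map Prod.fst).Nodup
instance (file_types : List (String × Int)) : Decidable (Pre_identify_project_type_py file_types) := by unfold Pre_identify_project_type_py; infer_instance

def pvWitness_identify_project_type_py : (List (String × Int)) := [("py", 3), ("js", 1)]

def Spec_identify_project_type_py (file_types : List (String × Int)) (out : String) : Prop := out = identify_project_type_py_alt file_types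
instance (file_types : List (String × Int)) (out : String) : Decidable (Spec_identify_project_type_py file_types out) := by unfold Spec_identify_project_type_py; infer_instance

-- ===== CLAIM (what is proved, stated in full; the proofs are below) =====
def Claim_equal_identify_project_type_py : Prop := ∀ (file_types : List (String × Int)), Dom_identify_project_type_py file_types → Pre_identify_project_type_py file_types → Spec_identify_project_type_py file_types (identify_project_type_py file_types)

-- ===== LEMMAS AND PROOFS =====

-- Inner loop of B: bumping every category in cats by v adds v * (count of c in cats) to c's score.
lemma pv_inner (cats : List String) (sc : PySem.Dict String Int) (v : Int) (c : String) :
    (cats.foldl (fun sc c' => sc.modify c' 0 (· + v)) sc).getD c 0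
      = sc.getD c 0 + v * (cats.count c : Int) := by
  induction cats generalizing sc with
  | nil => simp
  | cons a t ih =>
    simp only [List.foldl_cons, ih, List.count_cons, PySem.Dict.getD_modify]
    by_cases h : c = a
    · subst h; simp; ring
    · simp [h]
      exact Or.inl (Ne.symm h)

-- Outer loop of B: c's final score is its initial score plus the indexed contributions of all items.
lemma pv_outer (l : List (String × Int)) (sc : PySem.Dict String Int) (c : String) :
    (l.foldl (fun sc p => (pvExtIndex.getD p.1 []).foldl (fun sc c' => sc.modify c' 0 (· + p.2)) sc) sc).getD c 0
      = sc.getD c 0 + (l.map (fun p => p.2 * (((pvExtIndex.getD p.1 []).count c : Nat) : Int))).sum := by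
  induction l generalizing sc with
  | nil => simp
  | cons p t ih => simp only [List.foldl_cons, ih, List.map_cons, List.sum_cons, pv_inner]; ring

-- Bridge between the two tables: the inverted index lists c for k iff k is in c's extension list.
lemma pv_bridge (c : String) (exts : List String) (hmem : (c, exts) ∈ pvIndicators) (k : String) :
    (((pvExtIndex.getD k []).count c : Nat) : Int) = if k ∈ exts then 1 else 0 := by
  by_cases hk : k ∈ pvExtIndex.keys
  · fin_cases hmem <;> · fin_cases hk <;> decide
  · have h0 : pvExtIndex.getD k [] = [] := by
      apply PySem.Dict.getD_of_not_contains
      rw [PySem.Dict.contains_eq_decide_mem_keys]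
      simpa using hk
    rw [h0, if_neg]
    · simp
    · intro h2
      exact hk (by fin_cases hmem <;> fin_cases h2 <;> decide)

lemma pv_getD_mk_cons (k : String) (v : Int) (t : List (String × Int)) (e : String) :
    (PySem.Dict.mk ((k, v) :: t)).getD e 0 = if k = e then v else (PySem.Dict.mk t).getD e 0 := by
  simp [PySem.Dict.getD_eq_get?_getD, PySem.Dict.get?_mk_cons]
  split_ifs <;> simp

lemma pv_getD_not_mem (t : List (String × Int)) (k : String) (h : k ∉ t.map Prod.fst) :
    (PySem.Dict.mk t).getD k 0 = 0 := by
  rw [PySem.Dict.getD_eq_get?_getD, (PySem.Dict.get?_eq_none_iff_not_mem_keys _ _).mpr]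
  · rfl
  · simpa [PySem.Dict.keys] using h

-- Splitting one dict entry out of a duplicate-free sum of lookups.
lemma pv_sum_ite (exts : List String) (hnd : exts.Nodup) (k : String) (v : Int) (g : String → Int) :
    (exts.map (fun e => if k = e then v else g e)).sum
      = (if k ∈ exts then v - g k else 0) + (exts.map g).sum := by
  induction exts with
  | nil => simp
  | cons a t ih =>
    simp only [List.map_cons, List.sum_cons, List.mem_cons, List.nodup_cons] at *
    by_cases h : k = a
    · subst h
      simp [hnd.1, ih hnd.2]
      ring
    · simp [h, ih hnd.2]
      split_ifs <;> ring

-- A's per-category sum equals the indexed sum over the items (keys duplicate-free).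
lemma pv_side_a (ft : List (String × Int)) (hnd : (ft.map Prod.fst).Nodup)
    (c : String) (exts : List String) (hmem : (c, exts) ∈ pvIndicators) :
    (exts.map (fun ext => (PySem.Dict.mk ft).getD ext 0)).sum
      = (ft.map (fun p => p.2 * (((pvExtIndex.getD p.1 []).count c : Nat) : Int))).sum := by
  have hexts : exts.Nodup := by fin_cases hmem <;> decide
  induction ft with
  | nil => simp [pv_getD_not_mem]
  | cons p t ih =>
    simp only [List.map_cons, List.nodup_cons] at hnd
    have h1 : (exts.map (fun ext => (PySem.Dict.mk (p :: t)).getD ext 0)).sum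
        = (if p.1 ∈ exts then p.2 - (PySem.Dict.mk t).getD p.1 0 else 0)
          + (exts.map (fun ext => (PySem.Dict.mk t).getD ext 0)).sum := by
      have hp : (p.1, p.2) = p := rfl
      calc (exts.map (fun ext => (PySem.Dict.mk (p :: t)).getD ext 0)).sum
          = (exts.map (fun ext => if p.1 = ext then p.2 else (PySem.Dict.mk t).getD ext 0)).sum := by
            rw [← hp]
            simp only [pv_getD_mk_cons]
        _ = _ := pv_sum_ite exts hexts p.1 p.2 (fun e => (PySem.Dict.mk t).getD e 0)
    rw [h1, pv_getD_not_mem t p.1 hnd.1, ih hnd.2]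
    simp only [List.map_cons, List.sum_cons, pv_bridge c exts hmem p.1]
    split_ifs <;> ring

-- ===== VERDICT (by name: the statement is the Claim_ definition above) =====
theorem identify_project_type_py_spec : Claim_equal_identify_project_type_py := by
  intro ft _ hpre
  unfold Spec_identify_project_type_py identify_project_type_py identify_project_type_py_alt
  simp only [pvIndicators, pvCategories, List.foldl_cons, List.foldl_nil]
  rw [pv_outer, pv_outer, pv_outer, pv_outer, pv_outer]
  rw [pv_side_a ft hpre "web" _ (by decide), pv_side_a ft hpre "mobile" _ (by decide),
      pv_side_a ft hpre "backend" _ (by decide), pv_side_a ft hpre "data" _ (by decide),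
      pv_side_a ft hpre "devops" _ (by decide)]
  norm_num [PySem.Dict.getD_eq_get?_getD, PySem.Dict.get?_mk_cons]
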